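-- pv_equiv track=rewrite | github.com/disruptio-org/lm_rh_llm | utils.py | _formatar_palavra_nome
-- ===== SOURCE A (Python) =====
-- def _formatar_palavra_nome(parte):
--     segmentos_hifen = parte.split("-")
--     segmentos_resultado = []
--     for segmento in segmentos_hifen:
--         if not segmento:
--             return ""
--         sub_segmentos = segmento.split("'")
--         sub_resultado = []
--         for sub in sub_segmentos:
--             if not sub:
--                 return ""
--             if not sub[0].isalpha():
--                 return ""
--             sub_formatado = sub[0].upper() + sub[1:].lower()
--             sub_resultado.append(sub_formatado)
--         segmentos_resultado.append("'".join(sub_resultado))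
--     return "-".join(segmentos_resultado)
-- ===== SOURCE B (Python) =====
-- def _formatar_palavra_nome(parte):
--     # Single left-to-right character scan with a "segment start" flag,
--     # instead of nested split passes.
--     out = []
--     at_start = True
--     for ch in parte:
--         if ch == "-" or ch == "'":
--             if at_start:
--                 return ""
--             out.append(ch)
--             at_start = True
--         elif at_start:
--             if not ch.isalpha():
--                 return ""
--             out.append(ch.upper())
--             at_start = False
--         else:
--             out.append(ch.lower())
--     if at_start:
--         return ""
--     return "".join(out)
-- ===== Notes on version B (the rewrite author's own statement) =====
-- stated objective: simpler
-- what changed: Replaces A's nested split-on-'-' / split-on-'\'' passes with helper lists and joins by a single left-to-right character scan that keeps one 'segment start' flag and builds the output in one pass.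
import Mathlib
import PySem

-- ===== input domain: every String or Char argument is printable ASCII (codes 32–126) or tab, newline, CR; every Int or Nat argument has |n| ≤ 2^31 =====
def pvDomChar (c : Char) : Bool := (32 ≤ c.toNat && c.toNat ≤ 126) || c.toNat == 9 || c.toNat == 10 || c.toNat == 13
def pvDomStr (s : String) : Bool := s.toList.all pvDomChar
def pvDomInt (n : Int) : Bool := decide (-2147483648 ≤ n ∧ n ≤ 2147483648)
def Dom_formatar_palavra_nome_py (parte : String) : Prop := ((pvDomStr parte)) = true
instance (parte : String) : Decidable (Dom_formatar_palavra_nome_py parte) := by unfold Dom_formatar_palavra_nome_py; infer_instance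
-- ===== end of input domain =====

-- B replaces A's nested split('-')/split("'") passes by one character scan with a
-- "segment start" flag; same cost, simpler single pass (objective: simpler).

-- ===== PORT A =====
-- inner loop of A: over sub_segmentos; early 'return ""' modeled as none
-- (sub[1:] of sub = c :: cs is cs, exact for slice [1:])
def pvInnerLoop : List (List Char) → Option (List (List Char))
  | [] => some []
  | sub :: rest =>
    match sub with
    | [] => none
    | c :: cs =>
      if PySem.Chars.isalpha c then
        (pvInnerLoop rest).map ((PySem.Chars.upperChar c :: PySem.Chars.lower cs) :: ·)
      else none

-- outer loop of A: over segmentos_hifen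
def pvOuterLoop : List (List Char) → Option (List (List Char))
  | [] => some []
  | seg :: rest =>
    if seg.isEmpty then none
    else
      match pvInnerLoop (PySem.Chars.splitOn seg ['\'']) with
      | none => none
      | some subs => (pvOuterLoop rest).map (PySem.Chars.join ['\''] subs :: ·)

def formatar_palavra_nome_py (parte : String) : String :=
  match pvOuterLoop (PySem.Chars.splitOn parte.toList ['-']) with
  | none => ""
  | some segs => String.ofList (PySem.Chars.join ['-'] segs)

-- ===== PORT B =====
-- B's single scan: atStart = Python's at_start, acc = out (reversed); none = early 'return ""'
def pvScanB : List Char → Bool → List Char → Option (List Char)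
  | [], atStart, acc => if atStart then none else some acc.reverse
  | c :: cs, atStart, acc =>
    if c = '-' ∨ c = '\'' then
      if atStart then none else pvScanB cs true (c :: acc)
    else if atStart then
      if PySem.Chars.isalpha c then pvScanB cs false (PySem.Chars.upperChar c :: acc) else none
    else pvScanB cs false (PySem.Chars.lowerChar c :: acc)

def formatar_palavra_nome_py_alt (parte : String) : String :=
  match pvScanB parte.toList true [] with
  | none => ""
  | some l => String.ofList l

-- ===== PRECONDITION & SPEC =====
def Spec_formatar_palavra_nome_py (parte : String) (out : String) : Prop := out = formatar_palavra_nome_py_alt parte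
instance (parte : String) (out : String) : Decidable (Spec_formatar_palavra_nome_py parte out) := by unfold Spec_formatar_palavra_nome_py; infer_instance

-- ===== CLAIM (what is proved, stated in full; the proofs are below) =====
def Claim_equal_formatar_palavra_nome_py : Prop := ∀ (parte : String), Dom_formatar_palavra_nome_py parte → Spec_formatar_palavra_nome_py parte (formatar_palavra_nome_py parte)

-- ===== LEMMAS AND PROOFS =====

-- structural characterisation of PySem.Chars.splitOn for a one-character separator
def pvSpl (d : Char) : List Char → List (List Char)
  | [] => [[]]
  | c :: cs => if c = d then [] :: pvSpl d cs else List.modifyHead (c :: ·) (pvSpl d cs)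

lemma pvSpl_ne_nil (d : Char) (l : List Char) : pvSpl d l ≠ [] := by
  induction l with
  | nil => simp [pvSpl]
  | cons c cs ih =>
    simp only [pvSpl]
    split
    · simp
    · cases hs : pvSpl d cs with
      | nil => exact absurd hs ih
      | cons h t => simp [List.modifyHead]

lemma pvSplitOn_go_spec (d : Char) :
    ∀ (fuel : Nat) (l cur : List Char) (acc : List (List Char)), l.length ≤ fuel →
      PySem.Chars.splitOn.go [d] fuel l cur acc
        = acc.reverse ++ List.modifyHead (cur.reverse ++ ·) (pvSpl d l) := by
  intro fuel
  induction fuel with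
  | zero =>
    intro l cur acc h
    have : l = [] := List.eq_nil_of_length_eq_zero (Nat.le_zero.mp h)
    subst this
    rw [PySem.Chars.splitOn.go.eq_def]
    simp [pvSpl]
  | succ f ih =>
    intro l cur acc h
    cases l with
    | nil =>
      rw [PySem.Chars.splitOn.go.eq_def]
      simp [pvSpl]
    | cons c rest =>
      have hrest : rest.length ≤ f := by simpa using h
      rw [PySem.Chars.splitOn.go.eq_def]
      by_cases hc : c = d
      · subst hc
        have hpre : List.isPrefixOf [c] (c :: rest) = true := by
          simp [List.isPrefixOf]
        simp only [hpre, if_pos]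
        rw [ih _ _ _ (by simpa using hrest)]
        simp only [pvSpl, List.modifyHead, List.reverse_cons, List.append_assoc,
          List.nil_append, List.singleton_append, List.reverse_nil]
        cases hpv : pvSpl c rest <;> simp [hpv]
      · have hpre : List.isPrefixOf [d] (c :: rest) = false := by
          simp [List.isPrefixOf]
          exact fun hdc => (hc hdc.symm).elim
        simp only [hpre, Bool.false_eq_true, if_neg, not_false_iff]
        rw [ih _ _ _ hrest]
        simp only [pvSpl, if_neg hc]
        congr 1
        cases hs : pvSpl d rest with
        | nil => exact absurd hs (pvSpl_ne_nil d rest)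
        | cons h t => simp [List.modifyHead]

@[simp] lemma pvSplitOn_eq (d : Char) (l : List Char) :
    PySem.Chars.splitOn l [d] = pvSpl d l := by
  rw [PySem.Chars.splitOn, pvSplitOn_go_spec d (l.length + 1) l [] [] (by omega)]
  cases pvSpl d l <;> simp [List.modifyHead]

-- join with a single-char separator, expressed head/tail
def pvJ (d : Char) (r : List (List Char)) : List Char := (r.map (d :: ·)).flatten

lemma pvJoin_cons (d : Char) (x : List Char) (r : List (List Char)) :
    PySem.Chars.join [d] (x :: r) = x ++ pvJ d r := by
  induction r generalizing x with
  | nil => simp [PySem.Chars.join, pvJ, List.intercalate]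
  | cons y t ih =>
    have h1 : PySem.Chars.join [d] (x :: y :: t) = x ++ [d] ++ PySem.Chars.join [d] (y :: t) := by
      simp [PySem.Chars.join, List.intercalate, List.intersperse]
    rw [h1, ih]
    simp [pvJ]

-- the common reference spec: one char scan, st = "at segment start", delimiters d ∈ delims
def pvG (delims : List Char) : List Char → Bool → Option (List Char)
  | [], st => if st then none else some []
  | c :: cs, st =>
    if c ∈ delims then
      if st then none else (pvG delims cs true).map (c :: ·)
    else if st then
      if PySem.Chars.isalpha c then (pvG delims cs false).map (PySem.Chars.upperChar c :: ·) else none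
    else (pvG delims cs false).map (PySem.Chars.lowerChar c :: ·)

-- B equals the reference spec
lemma pvScanB_eq_G (cs : List Char) :
    ∀ (st : Bool) (acc : List Char),
      pvScanB cs st acc = (pvG ['-', '\''] cs st).map (acc.reverse ++ ·) := by
  induction cs with
  | nil =>
    intro st acc
    cases st <;> simp [pvScanB, pvG]
  | cons c rest ih =>
    intro st acc
    simp only [pvScanB, pvG, List.mem_cons, List.not_mem_nil, or_false]
    by_cases hd : c = '-' ∨ c = '\''
    · simp only [hd, if_pos]
      cases st with
      | true => simp
      | false =>
        simp only [Bool.false_eq_true, if_neg, not_false_iff]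
        rw [ih]
        cases pvG ['-', '\''] rest true <;> simp
    · simp only [hd, if_neg, not_false_iff]
      cases st with
      | false =>
        simp only [Bool.false_eq_true, if_neg, not_false_iff]
        rw [ih]
        cases pvG ['-', '\''] rest false <;> simp
      | true =>
        simp only [if_pos]
        by_cases ha : PySem.Chars.isalpha c = true
        · simp only [ha, if_pos]
          rw [ih]
          cases pvG ['-', '\''] rest false <;> simp
        · simp [ha]

-- inner level: A's sub-segment loop equals the reference spec with only "'" as delimiter
lemma pvInnerLoop_ne_nil (x : List Char) (xs : List (List Char)) (r : List (List Char))
    (h : pvInnerLoop (x :: xs) = some r) : r ≠ [] := by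
  intro hr
  subst hr
  cases x with
  | nil => simp [pvInnerLoop] at h
  | cons c cs =>
    simp only [pvInnerLoop] at h
    split at h
    · cases hm : pvInnerLoop xs <;> rw [hm] at h <;> simp at h
    · simp at h

lemma pvInner_char (seg : List Char) :
    (pvG ['\''] seg true = (pvInnerLoop (pvSpl '\'' seg)).map (PySem.Chars.join ['\''])) ∧
    (pvG ['\''] seg false =
      (pvInnerLoop (pvSpl '\'' seg).tail).map
        (fun r => PySem.Chars.lower ((pvSpl '\'' seg).headI) ++ pvJ '\'' r)) := by
  induction seg with
  | nil =>
    constructor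
    · simp [pvG, pvSpl, pvInnerLoop]
    · simp [pvG, pvSpl, pvInnerLoop, PySem.Chars.lower, pvJ]
  | cons c cs ih =>
    obtain ⟨ihs, ihm⟩ := ih
    by_cases hc : c = '\''
    · subst hc
      constructor
      · simp [pvG, pvSpl, pvInnerLoop]
      · -- delimiter while mid-segment: start a new sub
        have hsplit : pvSpl '\'' ('\'' :: cs) = [] :: pvSpl '\'' cs := by simp [pvSpl]
        simp only [pvG, List.mem_singleton, if_pos, hsplit, List.tail_cons, List.headI]
        rw [ihs]
        cases hs : pvSpl '\'' cs with
        | nil => exact absurd hs (pvSpl_ne_nil _ _)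
        | cons h t =>
          cases hm : pvInnerLoop (h :: t) with
          | none => simp
          | some r =>
            have hr : r ≠ [] := pvInnerLoop_ne_nil h t r hm
            cases r with
            | nil => exact absurd rfl hr
            | cons r0 rt =>
              simp [PySem.Chars.lower, pvJ, pvJoin_cons]
    · have hsplit : pvSpl '\'' (c :: cs) = List.modifyHead (c :: ·) (pvSpl '\'' cs) := by
        simp [pvSpl, hc]
      cases hs : pvSpl '\'' cs with
      | nil => exact absurd hs (pvSpl_ne_nil _ _)
      | cons h t =>
        have hsplit' : pvSpl '\'' (c :: cs) = (c :: h) :: t := by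
          rw [hsplit, hs]; simp [List.modifyHead]
        constructor
        · -- segment start: check alpha, uppercase
          simp only [pvG, List.mem_singleton, hc, if_neg, not_false_iff, if_pos, hsplit']
          by_cases ha : PySem.Chars.isalpha c = true
          · simp only [ha, if_pos, pvInnerLoop]
            rw [ihm, hs]
            simp only [List.tail_cons, List.headI]
            cases pvInnerLoop t <;> simp [pvJoin_cons, PySem.Chars.lower]
          · simp [ha, pvInnerLoop]
        · -- mid segment: lowercase and continue
          simp only [pvG, List.mem_singleton, hc, if_neg, not_false_iff, hsplit', List.tail_cons,
            List.headI]
          rw [ihm, hs]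
          simp only [List.tail_cons, List.headI]
          cases pvInnerLoop t <;> simp [PySem.Chars.lower]

-- outer level: A's segment loop equals the reference spec with both delimiters
lemma pvOuterLoop_ne_nil (x : List Char) (xs : List (List Char)) (r : List (List Char))
    (h : pvOuterLoop (x :: xs) = some r) : r ≠ [] := by
  intro hr
  subst hr
  simp only [pvOuterLoop] at h
  split at h
  · simp at h
  · split at h
    · simp at h
    · cases hm : pvOuterLoop xs <;> rw [hm] at h <;> simp at h

-- Gstart in terms of the first '-'-segment (follows from pvInner_char)
lemma pvGstart_decomp (cs : List Char) (h t : _) (hs : pvSpl '-' cs = h :: t) :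
    pvG ['-', '\''] cs true
      = (pvOuterLoop (pvSpl '-' cs)).map (PySem.Chars.join ['-'])
    → pvG ['-', '\''] cs true
      = match pvInnerLoop (pvSpl '\'' h) with
        | none => none
        | some ri =>
          match pvOuterLoop t with
          | none => none
          | some rt => some (PySem.Chars.join ['\''] ri ++ pvJ '-' rt) := by
  intro hA
  rw [hA, hs]
  simp only [pvOuterLoop]
  by_cases hh : h.isEmpty
  · have : h = [] := by cases h <;> simp_all [List.isEmpty]
    subst this
    simp [pvSpl, pvInnerLoop]
  · simp only [hh, Bool.false_eq_true, if_neg, not_false_iff]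
    cases hm : pvInnerLoop (pvSpl '\'' h) with
    | none => simp [hm]
    | some ri =>
      cases hm2 : pvOuterLoop t with
      | none => simp [hm]
      | some rt => simp [hm, pvJoin_cons]

lemma pvOuter_char (cs : List Char) :
    (pvG ['-', '\''] cs true = (pvOuterLoop (pvSpl '-' cs)).map (PySem.Chars.join ['-'])) ∧
    (pvG ['-', '\''] cs false =
      match pvG ['\''] ((pvSpl '-' cs).headI) false with
      | none => none
      | some r0 =>
        match pvOuterLoop (pvSpl '-' cs).tail with
        | none => none
        | some rt => some (r0 ++ pvJ '-' rt)) := by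
  induction cs with
  | nil =>
    constructor
    · simp [pvG, pvSpl, pvOuterLoop]
    · simp [pvG, pvSpl, pvOuterLoop, List.headI, pvJ]
  | cons c cs ih =>
    obtain ⟨ihs, ihm⟩ := ih
    by_cases hc : c = '-'
    · subst hc
      have hsplit : pvSpl '-' ('-' :: cs) = [] :: pvSpl '-' cs := by simp [pvSpl]
      constructor
      · simp [pvG, hsplit, pvOuterLoop]
      · have hL : pvG ['-', '\''] ('-' :: cs) false
            = (pvG ['-', '\''] cs true).map ('-' :: ·) := by simp [pvG]
        rw [hL, hsplit]
        simp only [List.tail_cons, List.headI]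
        rw [ihs]
        have hQ : pvG ['\''] [] false = some [] := by simp [pvG]
        rw [hQ]
        cases hs : pvSpl '-' cs with
        | nil => exact absurd hs (pvSpl_ne_nil _ _)
        | cons h t =>
          cases hm : pvOuterLoop (h :: t) with
          | none => simp
          | some r =>
            have hr : r ≠ [] := pvOuterLoop_ne_nil h t r hm
            cases r with
            | nil => exact absurd rfl hr
            | cons r0 rt => simp [pvJoin_cons, pvJ]
    · cases hs : pvSpl '-' cs with
      | nil => exact absurd hs (pvSpl_ne_nil _ _)
      | cons h t =>
        have hsplit : pvSpl '-' (c :: cs) = (c :: h) :: t := by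
          simp [pvSpl, hc, hs, List.modifyHead]
        by_cases hq : c = '\''
        · subst hq
          constructor
          · -- "'" at segment start: both sides fail
            have hL : pvG ['-', '\''] ('\'' :: cs) true = none := by simp [pvG]
            rw [hL, hsplit]
            simp only [pvOuterLoop]
            have hxs : pvSpl '\'' ('\'' :: h) = [] :: pvSpl '\'' h := by simp [pvSpl]
            simp [hxs, pvInnerLoop, List.isEmpty]
          · -- "'" mid-segment
            have hL : pvG ['-', '\''] ('\'' :: cs) false
                = (pvG ['-', '\''] cs true).map ('\'' :: ·) := by simp [pvG]
            rw [hL, pvGstart_decomp cs h t hs ihs, hsplit]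
            simp only [List.tail_cons, List.headI]
            have hQ : pvG ['\''] ('\'' :: h) false
                = (pvG ['\''] h true).map ('\'' :: ·) := by simp [pvG]
            rw [hQ, (pvInner_char h).1]
            cases hm : pvInnerLoop (pvSpl '\'' h) <;> cases hm2 : pvOuterLoop t <;>
              simp [*]
        · -- ordinary character
          have hQs : (pvSpl '\'' h) ≠ [] := pvSpl_ne_nil '\'' h
          have hsplitq : pvSpl '\'' (c :: h)
              = (c :: (pvSpl '\'' h).headI) :: (pvSpl '\'' h).tail := by
            cases hsq : pvSpl '\'' h with
            | nil => exact absurd hsq hQs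
            | cons hh tt => simp [pvSpl, hq, hsq, List.modifyHead, List.headI]
          have hR : pvOuterLoop ((c :: h) :: t)
              = match pvInnerLoop (pvSpl '\'' (c :: h)) with
                | none => none
                | some subs => (pvOuterLoop t).map (PySem.Chars.join ['\''] subs :: ·) := by
            simp [pvOuterLoop, List.isEmpty]
          constructor
          · -- segment start: check alpha, uppercase
            have hL : pvG ['-', '\''] (c :: cs) true
                = if PySem.Chars.isalpha c = true then
                    (pvG ['-', '\''] cs false).map (PySem.Chars.upperChar c :: ·)
                  else none := by simp [pvG, hc, hq]
            rw [hL, hsplit, hR, hsplitq]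
            by_cases ha : PySem.Chars.isalpha c = true
            · simp only [ha, if_pos, pvInnerLoop]
              rw [ihm, hs]
              simp only [List.tail_cons, List.headI]
              rw [(pvInner_char h).2]
              cases hm : pvInnerLoop (pvSpl '\'' h).tail <;>
                cases hm2 : pvOuterLoop t <;>
                  simp [*, pvJoin_cons, pvJ, List.headI]
            · simp [ha, pvInnerLoop]
          · -- mid segment: lowercase and continue
            have hL : pvG ['-', '\''] (c :: cs) false
                = (pvG ['-', '\''] cs false).map (PySem.Chars.lowerChar c :: ·) := by
              simp [pvG, hc, hq]
            rw [hL, ihm, hs, hsplit]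
            simp only [List.tail_cons, List.headI]
            have hQm : pvG ['\''] (c :: h) false
                = (pvG ['\''] h false).map (PySem.Chars.lowerChar c :: ·) := by
              simp [pvG, hq]
            rw [hQm]
            cases hm : pvG ['\''] h false <;> cases hm2 : pvOuterLoop t <;> simp [*]

-- ===== VERDICT (by name: the statement is the Claim_ definition above) =====
theorem formatar_palavra_nome_py_spec : Claim_equal_formatar_palavra_nome_py := by
  intro parte _
  unfold Spec_formatar_palavra_nome_py formatar_palavra_nome_py formatar_palavra_nome_py_alt
  rw [pvScanB_eq_G, pvSplitOn_eq, (pvOuter_char parte.toList).1]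
  cases pvOuterLoop (pvSpl '-' parte.toList) <;> simp
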